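-- pv_equiv track=rewrite | github.com/peppone-choi/openlogh | backend/scripts/mdx_parse_mds.py | group_descriptors
-- ===== SOURCE A (Python) =====
-- def group_descriptors(descs):
--     """Group descriptors that are adjacent (within 36 bytes of each other)."""
--     if not descs:
--         return []
--     groups = [[descs[0]]]
--     for d in descs[1:]:
--         prev = groups[-1][-1]
--         if d['off'] - prev['off'] == 36:
--             groups[-1].append(d)
--         else:
--             groups.append([d])
--     return groups
-- ===== SOURCE B (Python) =====
-- def group_descriptors(descs):
--     """Group descriptors that are adjacent (within 36 bytes of each other)."""
--     groups = []
--     for d in reversed(descs):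
--         if groups and groups[0][0]['off'] - d['off'] == 36:
--             groups[0].insert(0, d)
--         else:
--             groups.insert(0, [d])
--     return groups
-- ===== Notes on version B (the rewrite author's own statement) =====
-- stated objective: alternative
-- what changed: B builds the groups back-to-front: it iterates over reversed(descs) and either prepends the element to the first group (when the following element is exactly 36 bytes later) or prepends a fresh group, instead of A's forward loop that appends to the last group via groups[-1][-1].
import Mathlib
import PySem

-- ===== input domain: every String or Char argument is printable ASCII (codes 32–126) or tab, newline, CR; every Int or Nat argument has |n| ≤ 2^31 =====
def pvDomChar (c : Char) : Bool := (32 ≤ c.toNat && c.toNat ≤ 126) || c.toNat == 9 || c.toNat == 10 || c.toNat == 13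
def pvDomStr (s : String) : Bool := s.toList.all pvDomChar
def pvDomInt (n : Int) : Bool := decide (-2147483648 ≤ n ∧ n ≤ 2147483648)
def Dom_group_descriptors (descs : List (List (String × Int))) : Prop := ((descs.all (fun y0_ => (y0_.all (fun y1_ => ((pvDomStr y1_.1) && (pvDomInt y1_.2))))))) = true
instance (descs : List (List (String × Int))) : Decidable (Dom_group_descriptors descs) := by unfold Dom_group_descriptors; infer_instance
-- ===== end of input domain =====

-- B builds the groups back-to-front (a fold from the right, prepending to the first group)
-- instead of A's forward loop appending to the last group; same return value.

-- d['off'] as both Pythons read it (the default is only reached on states Pre_ excludes)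
def pvOff (d : List (String × Int)) : Int := ((PySem.Dict.mk d).get? "off").getD 0

-- ===== PORT A =====
-- groups[-1].append(d): append d to the last group
def pvAppendLast (groups : List (List (List (String × Int)))) (d : List (String × Int)) :
    List (List (List (String × Int))) :=
  match groups with
  | [] => []
  | [g] => [g ++ [d]]
  | g :: gs => g :: pvAppendLast gs d

-- one iteration of A's loop body
def pvAStep (groups : List (List (List (String × Int)))) (d : List (String × Int)) :
    List (List (List (String × Int))) :=
  let prev := ((groups.getLast?.getD []).getLast?.getD [])   -- prev = groups[-1][-1]
  if pvOff d - pvOff prev = 36 then pvAppendLast groups d else groups ++ [[d]]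

def group_descriptors (descs : List (List (String × Int))) : List (List (List (String × Int))) :=
  match descs with
  | [] => []
  | d0 :: rest => rest.foldl pvAStep [[d0]]

-- ===== PORT B =====
-- one iteration of B's loop body (iterating over reversed(descs), building at the front)
def pvBStep (d : List (String × Int)) (groups : List (List (List (String × Int)))) :
    List (List (List (String × Int))) :=
  match groups with
  | (x :: h) :: gs => if pvOff x - pvOff d = 36 then (d :: x :: h) :: gs else [d] :: (x :: h) :: gs
  | _ => [d] :: groups

def group_descriptors_alt (descs : List (List (String × Int))) : List (List (List (String × Int))) :=
  descs.foldr pvBStep []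

-- ===== PRECONDITION & SPEC =====
-- Pre_ excludes exactly the inputs where Python A raises KeyError: ≥ 2 descriptors,
-- one of which lacks the key 'off' (with ≤ 1 descriptors neither Python looks 'off' up).
def Pre_group_descriptors (descs : List (List (String × Int))) : Prop :=
  1 < descs.length → ∀ d ∈ descs, ((PySem.Dict.mk d).get? "off").isSome = true
instance (descs : List (List (String × Int))) : Decidable (Pre_group_descriptors descs) := by
  unfold Pre_group_descriptors; infer_instance

def pvWitness_group_descriptors : (List (List (String × Int))) :=
  [[("off", 0)], [("off", 36)], [("off", 100)]]

def Spec_group_descriptors (descs : List (List (String × Int))) (out : List (List (List (String × Int)))) : Prop := out = group_descriptors_alt descs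
instance (descs : List (List (String × Int))) (out : List (List (List (String × Int)))) : Decidable (Spec_group_descriptors descs out) := by unfold Spec_group_descriptors; infer_instance

-- ===== CLAIM (what is proved, stated in full; the proofs are below) =====
def Claim_equal_group_descriptors : Prop := ∀ (descs : List (List (String × Int))), Dom_group_descriptors descs → Pre_group_descriptors descs → Spec_group_descriptors descs (group_descriptors descs)

-- ===== LEMMAS AND PROOFS =====

-- constructor-level reductions of the three step functions
theorem pvBStep_nil (d : List (String × Int)) : pvBStep d [] = [[d]] := rfl

theorem pvBStep_cons (d x : List (String × Int)) (h : List (List (String × Int)))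
    (gs : List (List (List (String × Int)))) :
    pvBStep d ((x :: h) :: gs) =
      if pvOff x - pvOff d = 36 then (d :: x :: h) :: gs else [d] :: (x :: h) :: gs := rfl

-- A's step leaves every group but the last untouched
theorem pvAStep_cons (g : List (List (String × Int))) (gs : List (List (List (String × Int))))
    (d : List (String × Int)) (hgs : gs ≠ []) :
    pvAStep (g :: gs) d = g :: pvAStep gs d := by
  cases gs with
  | nil => exact absurd rfl hgs
  | cons g' gs' =>
    simp only [pvAStep, List.getLast?_cons_cons]
    split_ifs with h
    · simp [pvAppendLast]
    · simp

theorem pvAStep_ne_nil (gs : List (List (List (String × Int)))) (d : List (String × Int))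
    (h : gs ≠ []) : pvAStep gs d ≠ [] := by
  simp only [pvAStep]
  cases gs with
  | nil => exact absurd rfl h
  | cons g gs' =>
    split_ifs
    · cases gs' <;> simp [pvAppendLast]
    · simp

theorem foldl_pvAStep_cons (rest : List (List (String × Int)))
    (g : List (List (String × Int))) (gs : List (List (List (String × Int)))) (hgs : gs ≠ []) :
    List.foldl pvAStep (g :: gs) rest = g :: List.foldl pvAStep gs rest := by
  induction rest generalizing gs with
  | nil => rfl
  | cons d rest ih =>
    simp only [List.foldl_cons]
    rw [pvAStep_cons g gs d hgs, ih (pvAStep gs d) (pvAStep_ne_nil gs d hgs)]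

-- merging a running first group g into B's result for the remaining elements
def pvMerge (g : List (List (String × Int))) (gs : List (List (List (String × Int)))) :
    List (List (List (String × Int))) :=
  match gs with
  | (x :: h) :: gs' =>
      if pvOff x - pvOff (g.getLast?.getD []) = 36 then (g ++ x :: h) :: gs' else g :: (x :: h) :: gs'
  | _ => [g]

theorem pvMerge_nil (g : List (List (String × Int))) : pvMerge g [] = [g] := rfl

theorem pvMerge_cons (g : List (List (String × Int))) (x : List (String × Int)) (h : List (List (String × Int)))
    (gs' : List (List (List (String × Int)))) :
    pvMerge g ((x :: h) :: gs') =
      if pvOff x - pvOff (g.getLast?.getD []) = 36 then (g ++ x :: h) :: gs'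
      else g :: (x :: h) :: gs' := rfl

-- B's step always yields a first group starting with the inserted element
theorem pvBStep_head (d : List (String × Int)) (X : List (List (List (String × Int)))) :
    ∃ h gs, pvBStep d X = (d :: h) :: gs := by
  match X with
  | [] => exact ⟨[], [], rfl⟩
  | [] :: gs => exact ⟨[], [] :: gs, rfl⟩
  | (x :: h) :: gs =>
    rw [pvBStep_cons]
    split_ifs
    · exact ⟨x :: h, gs, rfl⟩
    · exact ⟨[], (x :: h) :: gs, rfl⟩

theorem pvAStep_singleton (g : List (List (String × Int))) (d : List (String × Int)) :
    pvAStep [g] d =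
      if pvOff d - pvOff (g.getLast?.getD []) = 36 then [g ++ [d]] else [g, [d]] := by
  simp only [pvAStep, pvAppendLast]
  rfl

-- the central invariant: A's forward loop started on the running group [g]
-- computes g merged into B's backward construction of the rest
theorem foldl_pvAStep_merge (rest : List (List (String × Int)))
    (g : List (List (String × Int))) :
    List.foldl pvAStep [g] rest = pvMerge g (List.foldr pvBStep [] rest) := by
  induction rest generalizing g with
  | nil => rfl
  | cons d rest ih =>
    simp only [List.foldl_cons, List.foldr_cons, pvAStep_singleton]
    by_cases hc : pvOff d - pvOff (g.getLast?.getD []) = 36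
    · rw [if_pos hc, ih (g ++ [d])]
      cases rest with
      | nil =>
        rw [List.foldr_nil, pvMerge_nil, pvBStep_nil, pvMerge_cons]
        simp [hc]
      | cons e rest' =>
        obtain ⟨h', gs', he⟩ := pvBStep_head e (List.foldr pvBStep [] rest')
        rw [List.foldr_cons, he, pvMerge_cons, pvBStep_cons]
        have hlast : ((g ++ [d]).getLast?.getD ([] : List (String × Int))) = d := by simp
        rw [hlast]
        by_cases hed : pvOff e - pvOff d = 36
        · rw [if_pos hed, if_pos hed, pvMerge_cons, if_pos hc]
          simp
        · rw [if_neg hed, if_neg hed, pvMerge_cons, if_pos hc]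
    · rw [if_neg hc]
      have h2 : ([g, [d]] : List (List (List (String × Int)))) = g :: [[d]] := rfl
      rw [h2, foldl_pvAStep_cons rest g [[d]] (by simp), ih [d]]
      have hd : (([d] : List (List (String × Int))).getLast?.getD ([] : List (String × Int))) = d := by simp
      cases rest with
      | nil =>
        rw [List.foldr_nil, pvMerge_nil, pvBStep_nil, pvMerge_cons]
        simp [hc]
      | cons e rest' =>
        obtain ⟨h', gs', he⟩ := pvBStep_head e (List.foldr pvBStep [] rest')
        rw [List.foldr_cons, he, pvMerge_cons, pvBStep_cons, hd]
        by_cases hed : pvOff e - pvOff d = 36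
        · rw [if_pos hed, if_pos hed, pvMerge_cons, if_neg hc]
          rfl
        · rw [if_neg hed, if_neg hed, pvMerge_cons, if_neg hc]

-- with a singleton running group, merging is exactly B's step
theorem pvMerge_singleton (d0 : List (String × Int)) (rest : List (List (String × Int))) :
    pvMerge [d0] (List.foldr pvBStep [] rest) = pvBStep d0 (List.foldr pvBStep [] rest) := by
  cases rest with
  | nil => rfl
  | cons e rest' =>
    obtain ⟨h', gs', he⟩ := pvBStep_head e (List.foldr pvBStep [] rest')
    rw [List.foldr_cons, he, pvMerge_cons, pvBStep_cons]
    have hd : (([d0] : List (List (String × Int))).getLast?.getD ([] : List (String × Int))) = d0 := by simp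
    rw [hd]
    split_ifs <;> rfl

-- ===== VERDICT (by name: the statement is the Claim_ definition above) =====
theorem group_descriptors_spec : Claim_equal_group_descriptors := by
  intro descs _ _
  unfold Spec_group_descriptors
  cases descs with
  | nil => rfl
  | cons d0 rest =>
    show List.foldl pvAStep [[d0]] rest = (d0 :: rest).foldr pvBStep []
    rw [List.foldr_cons, foldl_pvAStep_merge rest [d0], pvMerge_singleton]
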